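-- pv_equiv track=rewrite | github.com/ArunGiri392/FamousCodingInterviewQuestions | Removelement.py | movezerobackonefront
-- ===== SOURCE A (Python) =====
-- def movezerobackonefront(list, val = 0):
--     i = 0
--     j = 0
--     while j < len(list):
--         if list[i] != val and list[j] != val:
--             i += 1
--             j += 1
--         elif list[i] == val and list[j] == val:
--             j += 1
--         elif list[i] == val and list[j] != val:
--             temp = list[i]
--             list[i] = list[j]
--             list[j] = temp
--             i += 1
--         elif list[i] != val and list[j] == val:
--             j += 1
--
--
--     i = 0
--     j = 0
--     while i < len(list) and j < len(list):
--         if list[i] != 1 and list[j] == 1: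
--             i += 1
--             j += 1
--         elif list[i] == 1 and list[j] == 1:
--             j += 1
--         elif list[i] != 1 and list[j] != 1:
--             i += 1
--         elif list[i] == 1 and list[j] != 1:
--             if i > j:
--                 temp = list[i]
--                 list[i] = list[j]
--                 list[j] = temp
--                 i += 1
--                 j += 1
--             else:
--                 i += 1
--     return list
-- ===== SOURCE B (Python) =====
-- def movezerobackonefront(list, val=0):
--     # Mutates the argument in place (list[:] = ...) and returns it.
--     s = [x for x in list if x != val] + [x for x in list if x == val]
--     i = 0
--     for j in range(len(s)):
--         if s[j] == 1:
--             s[i], s[j] = s[j], s[i]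
--             i += 1
--     list[:] = s
--     return list
-- ===== Notes on version B (the rewrite author's own statement) =====
-- stated objective: simpler
-- what changed: A's first two-pointer swapping pass becomes a stable partition built from two comprehensions, and its four-branch two-pointer second pass becomes the textbook single-scan swap-to-front loop for the 1s.
import Mathlib
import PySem

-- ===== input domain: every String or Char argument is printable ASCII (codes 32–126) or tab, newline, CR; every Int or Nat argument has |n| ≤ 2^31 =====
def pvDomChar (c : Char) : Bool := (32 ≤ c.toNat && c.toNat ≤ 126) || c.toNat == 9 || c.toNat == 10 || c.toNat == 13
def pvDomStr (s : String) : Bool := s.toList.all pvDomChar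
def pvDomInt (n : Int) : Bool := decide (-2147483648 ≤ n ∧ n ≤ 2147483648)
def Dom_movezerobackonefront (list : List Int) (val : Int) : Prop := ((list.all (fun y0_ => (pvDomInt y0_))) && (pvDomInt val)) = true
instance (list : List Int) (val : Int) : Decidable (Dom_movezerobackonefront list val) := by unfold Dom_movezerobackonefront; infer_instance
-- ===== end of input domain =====

-- B replaces A's first two-pointer swapping pass by a stable partition built from two
-- comprehensions, and A's four-branch two-pointer second pass by the textbook single-scan
-- swap-to-front loop for the 1s (objective: simpler, same O(n) cost).
-- Both Pythons mutate the argument in place and return it; the equivalence proved here is about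
-- the returned value (the final list content, which is also the final content of the argument).

-- ===== PORT A =====
-- first while loop of A: move `val` elements to the back (two pointers, swaps).
-- The fuel argument only makes the recursion total: each iteration increases i + j, and the loop
-- runs only while j < len (and i < len), so 2*len+1 fuel is never exhausted before the loop exits.
def loopA1 : Nat → List Int → Int → Nat → Nat → List Int
  | 0, l, _, _, _ => l
  | fuel+1, l, val, i, j =>
    if j < l.length then
      if i < l.length then
        let li := l.getD i 0
        let lj := l.getD j 0
        if li ≠ val ∧ lj ≠ val then loopA1 fuel l val (i+1) (j+1)
        else if li = val ∧ lj = val then loopA1 fuel l val i (j+1)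
        else if li = val ∧ lj ≠ val then loopA1 fuel ((l.set i lj).set j li) val (i+1) j
        else loopA1 fuel l val i (j+1)
      else l
    else l

-- second while loop of A: move 1s to the front (two pointers, conditional swap); same fuel device.
def loopA2 : Nat → List Int → Nat → Nat → List Int
  | 0, l, _, _ => l
  | fuel+1, l, i, j =>
    if i < l.length ∧ j < l.length then
      let li := l.getD i 0
      let lj := l.getD j 0
      if li ≠ 1 ∧ lj = 1 then loopA2 fuel l (i+1) (j+1)
      else if li = 1 ∧ lj = 1 then loopA2 fuel l i (j+1)
      else if li ≠ 1 ∧ lj ≠ 1 then loopA2 fuel l (i+1) j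
      else if i > j then loopA2 fuel ((l.set i lj).set j li) (i+1) (j+1)
      else loopA2 fuel l (i+1) j
    else l

def movezerobackonefront (list : List Int) (val : Int) : List Int :=
  let l1 := loopA1 (2 * list.length + 1) list val 0 0
  loopA2 (2 * l1.length + 1) l1 0 0

-- ===== PORT B =====
-- body of Source B's `for j in range(len(s))` loop: state = (s, i); swap s[i] ↔ s[j] when s[j] == 1.
def bStep (p : List Int × Nat) (j : Nat) : List Int × Nat :=
  if p.1.getD j 0 = 1 then ((p.1.set j (p.1.getD p.2 0)).set p.2 1, p.2 + 1) else p

def movezerobackonefront_alt (list : List Int) (val : Int) : List Int :=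
  let s := list.filter (fun x => x != val) ++ list.filter (fun x => x == val)
  ((List.range s.length).foldl bStep (s, 0)).1

-- ===== PRECONDITION & SPEC =====
def Spec_movezerobackonefront (list : List Int) (val : Int) (out : List Int) : Prop := out = movezerobackonefront_alt list val
instance (list : List Int) (val : Int) (out : List Int) : Decidable (Spec_movezerobackonefront list val out) := by unfold Spec_movezerobackonefront; infer_instance

-- ===== CLAIM (what is proved, stated in full; the proofs are below) =====
def Claim_equal_movezerobackonefront : Prop := ∀ (list : List Int) (val : Int), Dom_movezerobackonefront list val → Spec_movezerobackonefront list val (movezerobackonefront list val)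

-- ===== LEMMAS AND PROOFS =====

-- Proof-side characterisation of both second passes: `k` counts placed 1s, `p` is the queue of
-- displaced non-1 values; each swap of a 1 past a nonempty queue rotates the queue by one.
def altGo : List Int → Nat → List Int → Nat × List Int
  | [], k, p => (k, p)
  | x :: xs, k, p =>
      if x ≠ 1 then altGo xs k (p ++ [x])
      else
        match p with
        | [] => altGo xs (k+1) []
        | v :: rest => altGo xs (k+1) (rest ++ [v])

theorem getD_all (B : List Int) (v : Int) (h : ∀ b ∈ B, b = v) (n : Nat) (hn : n < B.length) :
    B.getD n 0 = v := by
  rw [List.getD_eq_getElem _ _ hn]; exact h _ (List.getElem_mem _)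

theorem all_eq_replicate (P : List Int) (v : Int) (h : ∀ p ∈ P, p = v) :
    P = List.replicate P.length v := by
  apply List.eq_replicate_of_mem; intro b hb; exact h b hb

theorem rot_all (P : List Int) (v : Int) (h : ∀ p ∈ P, p = v) :
    P ++ [v] = v :: P := by
  conv_lhs => rw [all_eq_replicate P v h]
  conv_rhs => rw [all_eq_replicate P v h]
  rw [← List.replicate_succ', List.replicate_succ]

theorem getD_zero_allcons (P Q : List Int) (v : Int) (h : ∀ p ∈ P, p = v) :
    (P ++ v :: Q).getD 0 0 = v := by
  cases P with
  | nil => rfl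
  | cons p P => simpa using h p (by simp)

theorem loopA1_inv (val : Int) : ∀ (C A B : List Int) (fuel : Nat),
    (∀ a ∈ A, a ≠ val) → (∀ b ∈ B, b = val) →
    loopA1 (2 * C.length + 1 + fuel) (A ++ B ++ C) val A.length (A.length + B.length) =
      (A ++ C.filter (fun x => x != val)) ++ (B ++ C.filter (fun x => x == val)) := by
  intro C
  induction C with
  | nil =>
    intro A B fuel hA hB
    have hf : 2 * List.length ([] : List Int) + 1 + fuel = fuel + 1 := by simp <;> omega
    rw [hf, loopA1]
    rw [if_neg (by simp)]
    simp
  | cons x C ih =>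
    intro A B fuel hA hB
    have hlj : (A ++ B ++ (x :: C)).getD (A.length + B.length) 0 = x := by
      rw [List.append_assoc, List.getD_append_right _ _ _ _ (by omega),
          List.getD_append_right _ _ _ _ (by omega)]
      simp
    have hf : 2 * (x :: C).length + 1 + fuel = (2 * C.length + 1 + (fuel + 1)) + 1 := by
      simp <;> omega
    rw [hf, loopA1]
    rw [if_pos (by simp <;> omega), if_pos (by simp <;> omega)]
    simp only [hlj]
    cases B with
    | nil =>
      have hli : (A ++ [] ++ (x :: C)).getD A.length 0 = x := by
        rw [List.append_assoc, List.getD_append_right _ _ _ _ (by omega)]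
        simp
      simp only [hli]
      by_cases hx : x = val
      · rw [if_neg (by simp [hx]), if_pos ⟨hx, hx⟩]
        have h2 : A ++ [] ++ (x :: C) = A ++ [x] ++ C := by simp
        have h3 : A.length + List.length ([] : List Int) + 1 = A.length + [x].length := by simp
        rw [h2, h3, ih A [x] (fuel + 1) hA (by simpa using hx)]
        simp [hx]
      · rw [if_pos ⟨hx, hx⟩]
        have h2 : A ++ [] ++ (x :: C) = (A ++ [x]) ++ [] ++ C := by simp
        have h3 : A.length + 1 = (A ++ [x]).length := by simp
        have h4 : A.length + List.length ([] : List Int) + 1 =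
            (A ++ [x]).length + List.length ([] : List Int) := by simp
        rw [h4, h2, h3, ih (A ++ [x]) [] (fuel + 1) (by
          intro a ha
          rcases List.mem_append.1 ha with h | h
          · exact hA a h
          · simp at h; rw [h]; exact hx) (by simp)]
        simp [hx]
    | cons b Bt =>
      have hb : b = val := hB b (by simp)
      have hBt : ∀ p ∈ Bt, p = val := fun p hp => hB p (by simp [hp])
      have hli : (A ++ (b :: Bt) ++ (x :: C)).getD A.length 0 = val := by
        rw [List.append_assoc, List.getD_append_right _ _ _ _ (by omega)]
        simpa using hb
      simp only [hli]
      by_cases hx : x = val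
      · rw [if_neg (by simp), if_pos (by simp [hx])]
        have h2 : A ++ (b :: Bt) ++ (x :: C) = A ++ ((b :: Bt) ++ [x]) ++ C := by simp
        have h3 : A.length + (b :: Bt).length + 1 = A.length + ((b :: Bt) ++ [x]).length := by
          simp <;> omega
        rw [h3, h2, ih A ((b :: Bt) ++ [x]) (fuel + 1) hA (by
          intro y hy
          rcases List.mem_append.1 hy with h | h
          · exact hB y h
          · simp at h; rw [h]; exact hx)]
        simp [hx]
      · -- swap step, then one more step rejoins the canonical shape
        rw [if_neg (by simp), if_neg (by simp [hx]), if_pos (by simp [hx])]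
        have hset : ((A ++ (b :: Bt) ++ (x :: C)).set A.length x).set (A.length + (b :: Bt).length) val
            = A ++ (x :: (Bt ++ val :: C)) := by
          rw [List.append_assoc, List.set_append, if_neg (by omega), Nat.sub_self]
          have e1 : ((b :: Bt) ++ x :: C).set 0 x = x :: (Bt ++ x :: C) := by simp
          rw [e1, List.set_append, if_neg (by omega)]
          have e2 : A.length + (b :: Bt).length - A.length = Bt.length + 1 := by simp
          rw [e2]
          have e3 : (x :: (Bt ++ x :: C)).set (Bt.length + 1) val
              = x :: ((Bt ++ x :: C).set Bt.length val) := by simp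
          rw [e3, List.set_append, if_neg (by omega), Nat.sub_self]
          simp
        rw [hset]
        have hli2 : (A ++ (x :: (Bt ++ val :: C))).getD (A.length + 1) 0 = val := by
          rw [List.getD_append_right _ _ _ _ (by omega)]
          have : A.length + 1 - A.length = 1 := by omega
          rw [this]
          simpa using getD_zero_allcons Bt C val hBt
        have hlj2 : (A ++ (x :: (Bt ++ val :: C))).getD (A.length + (b :: Bt).length) 0 = val := by
          rw [List.getD_append_right _ _ _ _ (by omega)]
          have : A.length + (b :: Bt).length - A.length = Bt.length + 1 := by simp
          rw [this]
          have e4 : (x :: (Bt ++ val :: C)).getD (Bt.length + 1) 0 = (Bt ++ val :: C).getD Bt.length 0 := by simp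
          rw [e4, List.getD_append_right _ _ _ _ (by omega), Nat.sub_self]
          rfl
        have hf2 : 2 * C.length + 1 + (fuel + 1) = (2 * C.length + 1 + fuel) + 1 := by omega
        rw [hf2, loopA1]
        rw [if_pos (by simp <;> omega), if_pos (by simp <;> omega)]
        simp only [hli2, hlj2]
        rw [if_neg (by simp), if_pos (by simp)]
        have h2 : A ++ (x :: (Bt ++ val :: C)) = (A ++ [x]) ++ (Bt ++ [val]) ++ C := by simp
        have h3 : A.length + 1 = (A ++ [x]).length := by simp
        have h4 : A.length + (b :: Bt).length + 1 = (A ++ [x]).length + (Bt ++ [val]).length := by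
          simp <;> omega
        rw [h4, h2, h3, ih (A ++ [x]) (Bt ++ [val]) fuel (by
          intro a ha
          rcases List.mem_append.1 ha with h | h
          · exact hA a h
          · simp at h; rw [h]; exact hx) (by
          intro y hy
          rcases List.mem_append.1 hy with h | h
          · exact hBt y h
          · simpa using h)]
        rw [rot_all Bt val hBt] at *
        simp [hx, hb]

theorem loopA2_inv_aux : ∀ C : List Int,
    (∀ (O M : List Int) (fuel : Nat), (∀ o ∈ O, o = (1:Int)) → (∀ m ∈ M, m ≠ (1:Int)) →
      loopA2 (2 * C.length + 1 + fuel) (O ++ M ++ C) (O.length + M.length) O.length =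
        List.replicate (altGo C O.length M).1 1 ++ (altGo C O.length M).2) ∧
    (∀ (O : List Int) (i fuel : Nat), (∀ o ∈ O, o = (1:Int)) → i ≤ O.length →
      loopA2 ((O.length - i) + 2 * C.length + 1 + fuel) (O ++ C) i O.length =
        List.replicate (altGo C O.length []).1 1 ++ (altGo C O.length []).2) := by
  intro C
  induction C with
  | nil =>
    constructor
    · intro O M fuel hO hM
      have hf : 2 * List.length ([] : List Int) + 1 + fuel = fuel + 1 := by simp <;> omega
      rw [hf, loopA2]
      rw [if_neg (by simp)]
      simp only [altGo]
      rw [← all_eq_replicate O 1 hO]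
      simp
    · intro O i fuel hO hi
      by_cases hOl : O.length = 0
      · have hO0 : O = [] := List.eq_nil_of_length_eq_zero hOl
        subst hO0
        have hf : (List.length ([] : List Int) - i) + 2 * List.length ([] : List Int) + 1 + fuel
            = fuel + 1 := by simp <;> omega
        rw [hf, loopA2]
        rw [if_neg (by simp)]
        simp [altGo]
      · have hf : (O.length - i) + 2 * List.length ([] : List Int) + 1 + fuel
            = ((O.length - i) + fuel) + 1 := by simp <;> omega
        rw [hf, loopA2]
        rw [if_neg (by simp)]
        simp only [altGo]
        rw [← all_eq_replicate O 1 hO]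
  | cons x C ih =>
    obtain ⟨ihA, ihB⟩ := ih
    have hA : ∀ (O M : List Int) (fuel : Nat), (∀ o ∈ O, o = (1:Int)) → (∀ m ∈ M, m ≠ (1:Int)) →
        loopA2 (2 * (x :: C).length + 1 + fuel) (O ++ M ++ (x :: C)) (O.length + M.length) O.length =
          List.replicate (altGo (x :: C) O.length M).1 1 ++ (altGo (x :: C) O.length M).2 := by
      intro O M fuel hO hM
      have hli : (O ++ M ++ (x :: C)).getD (O.length + M.length) 0 = x := by
        rw [List.append_assoc, List.getD_append_right _ _ _ _ (by omega),
            List.getD_append_right _ _ _ _ (by omega)]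
        simp
      have hf : 2 * (x :: C).length + 1 + fuel = (2 * C.length + 2 + fuel) + 1 := by simp <;> omega
      rw [hf, loopA2]
      rw [if_pos (by constructor <;> (simp <;> omega))]
      simp only [hli]
      cases M with
      | nil =>
        have hlj : (O ++ [] ++ (x :: C)).getD O.length 0 = x := by
          rw [List.append_assoc, List.getD_append_right _ _ _ _ (by omega)]
          simp
        simp only [hlj]
        by_cases hx : x = 1
        · -- 1 with empty pending: j advances, switch to shape B
          rw [if_neg (by simp [hx]), if_pos (by simp [hx])]
          have h2 : O ++ [] ++ (x :: C) = (O ++ [x]) ++ C := by simp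
          have h3 : O.length + 1 = (O ++ [x]).length := by simp
          have h5 : 2 * C.length + 2 + fuel
              = ((O ++ [x]).length - (O.length + List.length ([] : List Int)))
                + 2 * C.length + 1 + fuel := by
            simp only [List.length_append, List.length_cons, List.length_nil]; omega
          rw [h2, h3, h5, ihB (O ++ [x]) (O.length + (List.length ([] : List Int))) fuel (by
            intro o ho
            rcases List.mem_append.1 ho with h | h
            · exact hO o h
            · simp at h; rw [h, hx]) (by simp)]
          simp [altGo, hx]
        · -- non-1 with empty pending: append to pending
          rw [if_neg (by simp [hx]), if_neg (by simp [hx]), if_pos ⟨hx, hx⟩]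
          have h2 : O ++ [] ++ (x :: C) = O ++ [x] ++ C := by simp
          have h3 : O.length + List.length ([] : List Int) + 1 = O.length + [x].length := by simp
          have h5 : 2 * C.length + 2 + fuel = 2 * C.length + 1 + (fuel + 1) := by omega
          rw [h2, h3, h5, ihA O [x] (fuel + 1) hO (by simpa using hx)]
          simp [altGo, hx]
      | cons m Mt =>
        have hm : m ≠ 1 := hM m (by simp)
        have hMt : ∀ p ∈ Mt, p ≠ (1:Int) := fun p hp => hM p (by simp [hp])
        have hlj : (O ++ (m :: Mt) ++ (x :: C)).getD O.length 0 = m := by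
          rw [List.append_assoc, List.getD_append_right _ _ _ _ (by omega)]
          simp
        simp only [hlj]
        by_cases hx : x = 1
        · -- 1 with nonempty pending: swap (i > j), rotate the queue
          rw [if_neg (by simp [hx]), if_neg (by simp [hm]), if_neg (by simp [hx]),
              if_pos (by simp <;> omega)]
          have hset : ((O ++ (m :: Mt) ++ (x :: C)).set (O.length + (m :: Mt).length) m).set O.length x
              = (O ++ [x]) ++ (Mt ++ [m]) ++ C := by
            rw [List.append_assoc, List.set_append, if_neg (by omega)]
            have e2 : O.length + (m :: Mt).length - O.length = Mt.length + 1 := by simp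
            rw [e2]
            have e3 : ((m :: Mt) ++ x :: C).set (Mt.length + 1) m
                = m :: ((Mt ++ x :: C).set Mt.length m) := by simp
            rw [e3, List.set_append, if_neg (by omega), Nat.sub_self]
            rw [List.set_append, if_neg (by omega), Nat.sub_self]
            simp
          rw [hset]
          have h3 : O.length + (m :: Mt).length + 1 = (O ++ [x]).length + (Mt ++ [m]).length := by
            simp <;> omega
          have h4 : O.length + 1 = (O ++ [x]).length := by simp
          have h5 : 2 * C.length + 2 + fuel = 2 * C.length + 1 + (fuel + 1) := by omega
          rw [h3, h4, h5, ihA (O ++ [x]) (Mt ++ [m]) (fuel + 1) (by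
            intro o ho
            rcases List.mem_append.1 ho with h | h
            · exact hO o h
            · simp at h; rw [h, hx]) (by
            intro p hp
            rcases List.mem_append.1 hp with h | h
            · exact hMt p h
            · simp at h; rw [h]; exact hm)]
          simp [altGo, hx]
        · -- non-1 with nonempty pending: append to pending
          rw [if_neg (by simp [hm]), if_neg (by simp [hx]), if_pos ⟨hx, hm⟩]
          have h2 : O ++ (m :: Mt) ++ (x :: C) = O ++ ((m :: Mt) ++ [x]) ++ C := by simp
          have h3 : O.length + (m :: Mt).length + 1 = O.length + ((m :: Mt) ++ [x]).length := by
            simp <;> omega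
          have h5 : 2 * C.length + 2 + fuel = 2 * C.length + 1 + (fuel + 1) := by omega
          rw [h2, h3, h5, ihA O ((m :: Mt) ++ [x]) (fuel + 1) hO (by
            intro p hp
            rcases List.mem_append.1 hp with h | h
            · exact hM p h
            · simp at h; rw [h]; exact hx)]
          simp [altGo, hx]
    have hB : ∀ (O : List Int) (i fuel : Nat), (∀ o ∈ O, o = (1:Int)) → i ≤ O.length →
        loopA2 ((O.length - i) + 2 * (x :: C).length + 1 + fuel) (O ++ (x :: C)) i O.length =
          List.replicate (altGo (x :: C) O.length []).1 1 ++ (altGo (x :: C) O.length []).2 := by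
      intro O i fuel hO hi
      by_cases hx : x = 1
      · -- head of the stream is 1 with empty pending: j moves on, i untouched
        have hlj : (O ++ (x :: C)).getD O.length 0 = x := by
          rw [List.getD_append_right _ _ _ _ (by omega), Nat.sub_self]
          rfl
        have hli : (O ++ (x :: C)).getD i 0 = 1 := by
          rcases Nat.lt_or_ge i O.length with h | h
          · rw [List.getD_append _ _ _ _ h]; exact getD_all O 1 hO i h
          · have : i = O.length := by omega
            rw [this, hlj, hx]
        have hf : (O.length - i) + 2 * (x :: C).length + 1 + fuel
            = (((O ++ [x]).length - i) + 2 * C.length + 1 + fuel) + 1 := by simp <;> omega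
        rw [hf, loopA2]
        rw [if_pos (by constructor <;> (simp <;> omega))]
        simp only [hli, hlj]
        rw [if_neg (by simp), if_pos (by simp [hx])]
        have h2 : O ++ (x :: C) = (O ++ [x]) ++ C := by simp
        have h3 : O.length + 1 = (O ++ [x]).length := by simp
        rw [h2, h3, ihB (O ++ [x]) i fuel (by
          intro o ho
          rcases List.mem_append.1 ho with h | h
          · exact hO o h
          · simp at h; rw [h, hx]) (by simp <;> omega)]
        simp [altGo, hx]
      · -- head is non-1: i catches up with j, then shape A with empty pending
        have hcatch : ∀ (d i' fuel' : Nat), i' + d = O.length →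
            loopA2 (fuel' + d) (O ++ (x :: C)) i' O.length
              = loopA2 fuel' (O ++ (x :: C)) O.length O.length := by
          intro d
          induction d with
          | zero => intro i' fuel' hi'; rw [show i' = O.length by omega, Nat.add_zero]
          | succ d ihd =>
            intro i' fuel' hi'
            have hi'' : i' < O.length := by omega
            have hli : (O ++ (x :: C)).getD i' 0 = 1 := by
              rw [List.getD_append _ _ _ _ hi'']; exact getD_all O 1 hO i' hi''
            have hlj : (O ++ (x :: C)).getD O.length 0 = x := by
              rw [List.getD_append_right _ _ _ _ (by omega), Nat.sub_self]
              rfl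
            have hf : fuel' + (d + 1) = (fuel' + d) + 1 := by omega
            rw [hf, loopA2]
            rw [if_pos (by constructor <;> (simp <;> omega))]
            simp only [hli, hlj]
            rw [if_neg (by simp [hx]), if_neg (by simp [hx]), if_neg (by simp),
                if_neg (by omega)]
            exact ihd (i' + 1) fuel' (by omega)
        have hf0 : (O.length - i) + 2 * (x :: C).length + 1 + fuel
            = (2 * (x :: C).length + 1 + fuel) + (O.length - i) := by omega
        rw [hf0, hcatch (O.length - i) i (2 * (x :: C).length + 1 + fuel) (by omega)]
        have := hA O [] fuel hO (by simp)
        simpa using this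
    exact ⟨hA, hB⟩

-- B's fold over range(len(s)) satisfies the same characterisation.
theorem foldB_inv : ∀ (C O M : List Int), (∀ o ∈ O, o = (1:Int)) → (∀ m ∈ M, m ≠ (1:Int)) →
    (List.range' (O.length + M.length) C.length).foldl bStep (O ++ M ++ C, O.length)
      = (List.replicate (altGo C O.length M).1 1 ++ (altGo C O.length M).2,
         (altGo C O.length M).1) := by
  intro C
  induction C with
  | nil =>
    intro O M hO hM
    simp only [List.length_nil, List.range'_zero, List.foldl_nil, altGo]
    rw [← all_eq_replicate O 1 hO]
    simp
  | cons x C ih =>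
    intro O M hO hM
    have hlj : (O ++ M ++ (x :: C)).getD (O.length + M.length) 0 = x := by
      rw [List.append_assoc, List.getD_append_right _ _ _ _ (by omega),
          List.getD_append_right _ _ _ _ (by omega)]
      simp
    rw [show (x :: C).length = C.length + 1 from by simp, List.range'_succ, List.foldl_cons]
    cases M with
    | nil =>
      by_cases hx : x = 1
      · -- 1 at the scan index with i = j: the swap is a no-op, i advances
        have hstep : bStep (O ++ [] ++ (x :: C), O.length) (O.length + List.length ([] : List Int))
            = ((O ++ [1]) ++ [] ++ C, (O ++ [1]).length) := by
          unfold bStep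
          rw [if_pos (by simpa [hlj] using hx)]
          have hli : (O ++ [] ++ (x :: C)).getD O.length 0 = x := by
            rw [List.append_assoc, List.getD_append_right _ _ _ _ (by omega)]
            simp
          have e0 : O.length + List.length ([] : List Int) = O.length := by simp
          rw [e0] at *
          simp only [hli]
          rw [List.append_nil, List.set_append, if_neg (by omega), Nat.sub_self,
          List.set_cons_zero, List.set_append, if_neg (by omega), Nat.sub_self,
          List.set_cons_zero]
          simp [hx]
        rw [hstep]
        have h4 : O.length + List.length ([] : List Int) + 1
            = (O ++ [1]).length + List.length ([] : List Int) := by simp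
        rw [h4, ih (O ++ [1]) [] (by
          intro o ho
          rcases List.mem_append.1 ho with h | h
          · exact hO o h
          · simpa using h) (by simp)]
        simp [altGo, hx]
      · -- non-1: no swap, the value joins the pending block
        have hstep : bStep (O ++ [] ++ (x :: C), O.length) (O.length + List.length ([] : List Int))
            = (O ++ [] ++ (x :: C), O.length) := by
          unfold bStep
          rw [if_neg (by simpa [hlj] using hx)]
        rw [hstep]
        have h2 : O ++ [] ++ (x :: C) = O ++ [x] ++ C := by simp
        have h3 : O.length + List.length ([] : List Int) + 1 = O.length + [x].length := by simp
        rw [h2, h3, ih O [x] hO (by simpa using hx)]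
        simp [altGo, hx]
    | cons m Mt =>
      have hm : m ≠ 1 := hM m (by simp)
      have hMt : ∀ p ∈ Mt, p ≠ (1:Int) := fun p hp => hM p (by simp [hp])
      have hli : (O ++ (m :: Mt) ++ (x :: C)).getD O.length 0 = m := by
        rw [List.append_assoc, List.getD_append_right _ _ _ _ (by omega)]
        simp
      by_cases hx : x = 1
      · -- 1 at the scan index: swap with s[i] rotates the pending block
        have hstep : bStep (O ++ (m :: Mt) ++ (x :: C), O.length) (O.length + (m :: Mt).length)
            = ((O ++ [1]) ++ (Mt ++ [m]) ++ C, (O ++ [1]).length) := by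
          unfold bStep
          rw [if_pos (by simpa [hlj] using hx)]
          simp only [hli]
          have hset : ((O ++ (m :: Mt) ++ (x :: C)).set (O.length + (m :: Mt).length) m).set O.length 1
              = (O ++ [1]) ++ (Mt ++ [m]) ++ C := by
            rw [List.append_assoc, List.set_append, if_neg (by omega)]
            have e2 : O.length + (m :: Mt).length - O.length = Mt.length + 1 := by simp
            rw [e2]
            have e3 : ((m :: Mt) ++ x :: C).set (Mt.length + 1) m
                = m :: ((Mt ++ x :: C).set Mt.length m) := by simp
            rw [e3, List.set_append, if_neg (by omega), Nat.sub_self]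
            rw [List.set_append, if_neg (by omega), Nat.sub_self]
            simp [hx]
          rw [hset]
          simp
        rw [hstep]
        have h3 : O.length + (m :: Mt).length + 1 = (O ++ [1]).length + (Mt ++ [m]).length := by
          simp <;> omega
        rw [h3, ih (O ++ [1]) (Mt ++ [m]) (by
          intro o ho
          rcases List.mem_append.1 ho with h | h
          · exact hO o h
          · simpa using h) (by
          intro p hp
          rcases List.mem_append.1 hp with h | h
          · exact hMt p h
          · simp at h; rw [h]; exact hm)]
        simp [altGo, hx]
      · -- non-1: no swap, pending grows
        have hstep : bStep (O ++ (m :: Mt) ++ (x :: C), O.length) (O.length + (m :: Mt).length)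
            = (O ++ (m :: Mt) ++ (x :: C), O.length) := by
          unfold bStep
          rw [if_neg (by simpa [hlj] using hx)]
        rw [hstep]
        have h2 : O ++ (m :: Mt) ++ (x :: C) = O ++ ((m :: Mt) ++ [x]) ++ C := by simp
        have h3 : O.length + (m :: Mt).length + 1 = O.length + ((m :: Mt) ++ [x]).length := by
          simp <;> omega
        rw [h2, h3, ih O ((m :: Mt) ++ [x]) hO (by
          intro p hp
          rcases List.mem_append.1 hp with h | h
          · exact hM p h
          · simp at h; rw [h]; exact hx)]
        simp [altGo, hx]

theorem movezerobackonefront_eq (list : List Int) (val : Int) :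
    movezerobackonefront list val = movezerobackonefront_alt list val := by
  have h1 : loopA1 (2 * list.length + 1) list val 0 0
      = list.filter (fun x => x != val) ++ list.filter (fun x => x == val) := by
    simpa using loopA1_inv val list [] [] 0 (by simp) (by simp)
  have hA := (loopA2_inv_aux (list.filter (fun x => x != val) ++ list.filter (fun x => x == val))).1
      [] [] 0 (by simp) (by simp)
  have hB := foldB_inv (list.filter (fun x => x != val) ++ list.filter (fun x => x == val))
      [] [] (by simp) (by simp)
  simp only [List.nil_append, List.length_nil, Nat.add_zero, Nat.zero_add] at hA hB
  show loopA2 (2 * (loopA1 (2 * list.length + 1) list val 0 0).length + 1)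
      (loopA1 (2 * list.length + 1) list val 0 0) 0 0
    = ((List.range (list.filter (fun x => x != val) ++ list.filter (fun x => x == val)).length).foldl
        bStep (list.filter (fun x => x != val) ++ list.filter (fun x => x == val), 0)).1
  rw [h1, List.range_eq_range', hA, hB]

-- ===== VERDICT (by name: the statement is the Claim_ definition above) =====
theorem movezerobackonefront_spec : Claim_equal_movezerobackonefront := by
  intro list val _
  exact movezerobackonefront_eq list val
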